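-- pv_equiv track=rewrite | github.com/KhaqanNasir/comsats-chatbot | pages/4_📝_Notes_Maker.py | extract_headings_and_content
-- ===== SOURCE A (Python) =====
-- def extract_headings_and_content(text):
--     headings_and_content = []
--     lines = text.split('\n')
--
--     current_heading = None
--     current_content = []
--
--     for line in lines:
--         if line.strip():
--             if line.isupper():
--                 if current_heading:
--                     headings_and_content.append((current_heading, '\n'.join(current_content)))
--                 current_heading = line.strip()
--                 current_content = []
--             else:
--                 current_content.append(line.strip())
--
--     if current_heading:
--         headings_and_content.append((current_heading, '\n'.join(current_content)))
--
--     return headings_and_content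
-- ===== SOURCE B (Python) =====
-- def extract_headings_and_content(text):
--     lines = [l.strip() for l in text.split('\n') if l.strip()]
--     n = len(lines)
--     i = 0
--     while i < n and not lines[i].isupper():
--         i += 1
--     result = []
--     while i < n:
--         heading = lines[i]
--         content = []
--         j = i + 1
--         while j < n and not lines[j].isupper():
--             content.append(lines[j])
--             j += 1
--         result.append((heading, '\n'.join(content)))
--         i = j
--     return result
-- ===== Notes on version B (the rewrite author's own statement) =====
-- stated objective: alternative
-- what changed: B first normalises the text into a list of stripped non-empty lines, skips the pre-heading prefix, then segments by scanning indices heading-by-heading with an inner while loop, instead of A's single accumulator fold with a current-heading/current-content state and a trailing flush.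
import Mathlib
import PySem

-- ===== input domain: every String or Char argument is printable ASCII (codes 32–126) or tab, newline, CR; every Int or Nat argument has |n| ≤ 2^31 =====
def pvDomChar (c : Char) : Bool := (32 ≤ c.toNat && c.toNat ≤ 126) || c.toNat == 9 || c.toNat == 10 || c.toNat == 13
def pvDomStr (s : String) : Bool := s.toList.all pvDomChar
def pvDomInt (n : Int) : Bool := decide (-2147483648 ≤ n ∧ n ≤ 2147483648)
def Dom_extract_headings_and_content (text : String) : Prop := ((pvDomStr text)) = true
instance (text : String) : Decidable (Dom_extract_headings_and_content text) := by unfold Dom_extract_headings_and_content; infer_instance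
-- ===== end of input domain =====

-- B groups lines under uppercase headings by index-scanning heading segments over a
-- pre-normalised line list, instead of A's accumulator fold with a trailing flush;
-- same cost, different decomposition.

-- str.isupper(): at least one cased character and no lowercase one; exact on the ASCII
-- domain, where the cased characters are exactly the alphabetic ones.
def pyIsupper (cs : List Char) : Bool :=
  cs.any PySem.Chars.isalpha && !(cs.any PySem.Chars.islower)

-- ===== PORT A =====
-- loop state: (headings_and_content, current_heading, current_content)
def aStep (st : List (List Char × List Char) × Option (List Char) × List (List Char))
    (line : List Char) : List (List Char × List Char) × Option (List Char) × List (List Char) :=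
  if PySem.Chars.strip line ≠ [] then
    if pyIsupper line then
      (aFlush st, some (PySem.Chars.strip line), [])
    else
      (st.1, st.2.1, st.2.2 ++ [PySem.Chars.strip line])
  else st
where
  -- 'if current_heading: headings_and_content.append(...)' — truthy iff not None and non-empty
  aFlush (st : List (List Char × List Char) × Option (List Char) × List (List Char)) :
      List (List Char × List Char) :=
    match st.2.1 with
    | some h => if h ≠ [] then st.1 ++ [(h, PySem.Chars.join ['\n'] st.2.2)] else st.1
    | none => st.1

def extract_headings_and_content (text : String) : List (String × String) :=
  let lines := PySem.Chars.splitOn text.toList ['\n']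
  let st := lines.foldl aStep ([], none, [])
  (aStep.aFlush st).map (fun p => (String.ofList p.1, String.ofList p.2))

-- ===== PORT B =====
-- inner while loop: collect content lines until the next heading, return (content, rest)
def bCollect (lines : List (List Char)) : List (List Char) × List (List Char) :=
  match lines with
  | [] => ([], [])
  | l :: rest =>
    if pyIsupper l then ([], l :: rest)
    else
      let p := bCollect rest
      (l :: p.1, p.2)

-- needed by bSegs's termination argument
theorem bCollect_snd_len (lines : List (List Char)) : (bCollect lines).2.length ≤ lines.length := by
  induction lines with
  | nil => simp [bCollect]
  | cons l rest ih =>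
    simp only [bCollect]
    split
    · simp
    · exact Nat.le_succ_of_le ih

-- outer while loop: heading at the cursor, collected content, recurse on the rest
def bSegs (lines : List (List Char)) : List (List Char × List Char) :=
  match lines with
  | [] => []
  | h :: rest =>
    (h, PySem.Chars.join ['\n'] (bCollect rest).1) :: bSegs (bCollect rest).2
termination_by lines.length
decreasing_by
  exact Nat.lt_succ_of_le (bCollect_snd_len rest)

def extract_headings_and_content_alt (text : String) : List (String × String) :=
  let lines := ((PySem.Chars.splitOn text.toList ['\n']).map PySem.Chars.strip).filter (· ≠ [])
  let segs := bSegs (lines.dropWhile (fun l => !pyIsupper l))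
  segs.map (fun p => (String.ofList p.1, String.ofList p.2))

-- ===== PRECONDITION & SPEC =====
def Spec_extract_headings_and_content (text : String) (out : List (String × String)) : Prop := out = extract_headings_and_content_alt text
instance (text : String) (out : List (String × String)) : Decidable (Spec_extract_headings_and_content text out) := by unfold Spec_extract_headings_and_content; infer_instance

-- ===== CLAIM (what is proved, stated in full; the proofs are below) =====
def Claim_equal_extract_headings_and_content : Prop := ∀ (text : String), Dom_extract_headings_and_content text → Spec_extract_headings_and_content text (extract_headings_and_content text)

-- ===== LEMMAS AND PROOFS =====

theorem isalpha_eq_false_of_isspace (c : Char) (h : PySem.Chars.isspace c = true) :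
    PySem.Chars.isalpha c = false := by
  simp [PySem.Chars.isspace] at h
  simp [PySem.Chars.isalpha, PySem.Chars.isupper, PySem.Chars.islower, Char.le_def,
    UInt32.le_iff_toNat_le]
  omega

theorem islower_eq_false_of_isspace (c : Char) (h : PySem.Chars.isspace c = true) :
    PySem.Chars.islower c = false := by
  simp [PySem.Chars.isspace] at h
  simp [PySem.Chars.islower, Char.le_def, UInt32.le_iff_toNat_le]
  omega

theorem any_dropWhile_isspace (p : Char → Bool) (hp : ∀ c, PySem.Chars.isspace c = true → p c = false)
    (l : List Char) : (l.dropWhile PySem.Chars.isspace).any p = l.any p := by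
  induction l with
  | nil => rfl
  | cons c l ih =>
    by_cases hc : PySem.Chars.isspace c = true
    · simp [hc, ih, hp c hc]
    · simp [hc]

theorem any_strip (p : Char → Bool) (hp : ∀ c, PySem.Chars.isspace c = true → p c = false)
    (l : List Char) : (PySem.Chars.strip l).any p = l.any p := by
  simp [PySem.Chars.strip, PySem.Chars.rstrip, PySem.Chars.lstrip,
    any_dropWhile_isspace p hp]

-- whitespace is uncased, so stripping does not change isupper()
theorem pyIsupper_strip (l : List Char) : pyIsupper (PySem.Chars.strip l) = pyIsupper l := by
  simp [pyIsupper, any_strip _ isalpha_eq_false_of_isspace, any_strip _ islower_eq_false_of_isspace]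

theorem foldl_aStep_some (ls : List (List Char)) :
    ∀ (res : List (List Char × List Char)) (h : List Char) (cc : List (List Char)),
    h ≠ [] → (∀ l ∈ ls, PySem.Chars.strip l ≠ []) →
    aStep.aFlush (ls.foldl aStep (res, some h, cc)) =
      res ++ (h, PySem.Chars.join ['\n'] (cc ++ (bCollect (ls.map PySem.Chars.strip)).1)) ::
        bSegs (bCollect (ls.map PySem.Chars.strip)).2 := by
  induction ls with
  | nil => intro res h cc hne _; simp [aStep.aFlush, hne, bSegs, bCollect]
  | cons l ls ih =>
    intro res h cc hne hall
    have hl : PySem.Chars.strip l ≠ [] := hall l (by simp)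
    have hall' : ∀ x ∈ ls, PySem.Chars.strip x ≠ [] := fun x hx => hall x (by simp [hx])
    by_cases hup : pyIsupper l = true
    · have : aStep (res, some h, cc) l
          = (res ++ [(h, PySem.Chars.join ['\n'] cc)], some (PySem.Chars.strip l), []) := by
        simp [aStep, hl, hup, aStep.aFlush, hne]
      rw [List.foldl_cons, this, ih _ _ _ hl hall']
      simp [bCollect, pyIsupper_strip, hup, bSegs]
    · have : aStep (res, some h, cc) l
          = (res, some h, cc ++ [PySem.Chars.strip l]) := by
        simp [aStep, hl, hup]
      rw [List.foldl_cons, this, ih _ _ _ hne hall']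
      simp [bCollect, pyIsupper_strip, hup]

theorem foldl_aStep_none (ls : List (List Char)) :
    ∀ (res : List (List Char × List Char)) (cc : List (List Char)),
    (∀ l ∈ ls, PySem.Chars.strip l ≠ []) →
    aStep.aFlush (ls.foldl aStep (res, none, cc)) =
      res ++ bSegs ((ls.map PySem.Chars.strip).dropWhile (fun l => !pyIsupper l)) := by
  induction ls with
  | nil => intro res cc _; simp [aStep.aFlush, bSegs]
  | cons l ls ih =>
    intro res cc hall
    have hl : PySem.Chars.strip l ≠ [] := hall l (by simp)
    have hall' : ∀ x ∈ ls, PySem.Chars.strip x ≠ [] := fun x hx => hall x (by simp [hx])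
    by_cases hup : pyIsupper l = true
    · have : aStep (res, none, cc) l = (res, some (PySem.Chars.strip l), []) := by
        simp [aStep, hl, hup, aStep.aFlush]
      rw [List.foldl_cons, this, foldl_aStep_some _ _ _ _ hl hall']
      simp [pyIsupper_strip, hup, bSegs]
    · have : aStep (res, none, cc) l = (res, none, cc ++ [PySem.Chars.strip l]) := by
        simp [aStep, hl, hup]
      rw [List.foldl_cons, this, ih _ _ hall']
      simp [pyIsupper_strip, hup]

-- A's loop ignores lines that strip to empty
theorem foldl_aStep_filter (ls : List (List Char)) (st) :
    ls.foldl aStep st = (ls.filter (fun l => PySem.Chars.strip l ≠ [])).foldl aStep st := by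
  induction ls generalizing st with
  | nil => rfl
  | cons l ls ih =>
    by_cases hl : PySem.Chars.strip l ≠ []
    · simp [hl, List.foldl_cons, ih]
    · simp only [ne_eq, not_not] at hl
      have : aStep st l = st := by simp [aStep, hl]
      simp [hl, List.foldl_cons, this, ih]

-- ===== VERDICT (by name: the statement is the Claim_ definition above) =====
theorem extract_headings_and_content_spec : Claim_equal_extract_headings_and_content := by
  intro text _
  unfold Spec_extract_headings_and_content
  show List.map _ (aStep.aFlush (List.foldl aStep ([], none, []) (PySem.Chars.splitOn text.toList ['\n']))) = _
  rw [foldl_aStep_filter, foldl_aStep_none _ _ _ (by simp [List.mem_filter])]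
  simp [extract_headings_and_content_alt, List.filter_map]
  rfl
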